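-- pv_equiv track=rewrite | github.com/PhucQuach1907/PTIT | CodePTIT/Source_Code-main/PYTHON_PTIT/PY01024.py | Check
-- ===== SOURCE A (Python) =====
-- def Check(n):
--     sum = n % 10
--     prev = n % 10
--     n //= 10
--     while n:
--         cur = n % 10
--         sum += n % 10
--         if (abs(cur-prev) != 2):
--             return False
--         prev = cur
--         n //= 10
--     return (sum % 10 == 0)
-- ===== SOURCE B (Python) =====
-- # The legal digit transitions (pairs of decimal digits differing by exactly 2).
-- VALID_STEPS = {(0, 2), (2, 0), (1, 3), (3, 1), (2, 4), (4, 2), (3, 5), (5, 3),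
--                (4, 6), (6, 4), (5, 7), (7, 5), (6, 8), (8, 6), (7, 9), (9, 7)}
--
-- def Check(n):
--     digits = [int(c) for c in str(n)]
--     ok = all((digits[i], digits[i + 1]) in VALID_STEPS for i in range(len(digits) - 1))
--     return ok and sum(digits) % 10 == 0
-- ===== Notes on version B (the rewrite author's own statement) =====
-- stated objective: alternative
-- what changed: A's fused least-significant-first modular loop (running sum, prev digit, early return, abs-difference arithmetic) is replaced by building the most-significant-first digit list from str(n) and judging adjacency by membership of each (digits[i], digits[i+1]) window in a precomputed lookup table of the legal digit transitions, plus a separate digit-sum pass.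
-- outside the precondition, e.g. on Check(-13): A returns False, B raises ValueError; on Check(-2): A returns False, B raises ValueError
import Mathlib
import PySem

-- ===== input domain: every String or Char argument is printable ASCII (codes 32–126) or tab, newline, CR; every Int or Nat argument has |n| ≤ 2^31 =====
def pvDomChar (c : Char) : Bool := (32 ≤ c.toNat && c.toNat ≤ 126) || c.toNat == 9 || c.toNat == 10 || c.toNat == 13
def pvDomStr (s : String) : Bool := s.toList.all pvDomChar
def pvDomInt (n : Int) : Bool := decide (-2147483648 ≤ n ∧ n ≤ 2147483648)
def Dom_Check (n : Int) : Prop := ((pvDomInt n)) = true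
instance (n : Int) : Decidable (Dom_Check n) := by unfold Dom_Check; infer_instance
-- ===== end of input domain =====

-- B builds the digit list from str(n) and judges adjacency by a lookup table of the legal
-- digit transitions over indexed windows, plus a separate digit-sum pass, instead of A's fused
-- least-significant-first modular-arithmetic loop; an alternative of the same cost.

-- ===== PORT A =====
-- the while loop of A; fuel |n|+1 is enough for n ≥ 0 since n //= 10 strictly shrinks n
def pvLoopA : Nat → Int → Int → Int → Bool
  | 0, _, _, _ => false
  | f + 1, n, sum, prev =>
    if n ≠ 0 then
      let cur := PySem.Int.mod n 10
      let sum := sum + PySem.Int.mod n 10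
      if |cur - prev| ≠ 2 then false
      else pvLoopA f (PySem.Int.floordiv n 10) sum cur
    else (PySem.Int.mod sum 10 == 0)

def Check (n : Int) : Bool :=
  let sum := PySem.Int.mod n 10
  let prev := PySem.Int.mod n 10
  pvLoopA (n.natAbs + 1) (PySem.Int.floordiv n 10) sum prev

-- ===== PORT B =====
-- the Python set VALID_STEPS, as its list of (distinct) elements; only membership is used
def pvValidSteps : List (Int × Int) :=
  [(0, 2), (2, 0), (1, 3), (3, 1), (2, 4), (4, 2), (3, 5), (5, 3),
   (4, 6), (6, 4), (5, 7), (7, 5), (6, 8), (8, 6), (7, 9), (9, 7)]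

def Check_alt (n : Int) : Bool :=
  -- int(c) on a single decimal-digit character is c.toNat - 48; exact here since str(n) for n ≥ 0 (Pre_) consists of '0'..'9' only
  let digits : List Int := (PySem.Int.toStr n).toList.map (fun c => ((c.toNat : Int) - 48))
  let ok := (PySem.List.pyRange 0 ((digits.length : Int) - 1) 1).all
      (fun i => pvValidSteps.contains (PySem.List.pyGetD digits i 0, PySem.List.pyGetD digits (i + 1) 0))
  ok && (PySem.Int.mod digits.sum 10 == 0)

-- ===== PRECONDITION & SPEC =====
-- Pre_ excludes negative n, on which A returns False (its floor-division digits eventually repeat 9)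
-- while B's natural int('-') raises ValueError.
def Pre_Check (n : Int) : Prop := 0 ≤ n
instance (n : Int) : Decidable (Pre_Check n) := by unfold Pre_Check; infer_instance
def pvWitness_Check : Int := (13)

def Spec_Check (n : Int) (out : Bool) : Prop := out = Check_alt n
instance (n : Int) (out : Bool) : Decidable (Spec_Check n out) := by unfold Spec_Check; infer_instance

-- ===== CLAIM (what is proved, stated in full; the proofs are below) =====
def Claim_equal_Check : Prop := ∀ (n : Int), Dom_Check n → Pre_Check n → Spec_Check n (Check n)

-- ===== LEMMAS AND PROOFS =====

-- digits of m, most significant first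
def msdN (m : Nat) : List Nat :=
  if m < 10 then [m] else msdN (m / 10) ++ [m % 10]
termination_by m
decreasing_by exact Nat.div_lt_self (by omega) (by norm_num)

-- digits of m, least significant first, as Ints ([] for m = 0)
def lsfI (m : Nat) : List Int :=
  if h : m = 0 then [] else ((m % 10 : Nat) : Int) :: lsfI (m / 10)
termination_by m
decreasing_by exact Nat.div_lt_self (by omega) (by norm_num)

def adjP (xs : List Int) : Bool := (xs.zip xs.tail).all (fun ab => |ab.1 - ab.2| == 2)

def pairsAll (g : Int → Int → Bool) (xs : List Int) : Bool :=
  (xs.zip xs.tail).all (fun ab => g ab.1 ab.2)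

def goA : List Int → Int → Int → Bool
  | [], s, _ => PySem.Int.mod s 10 == 0
  | c :: rest, s, p => if |c - p| ≠ 2 then false else goA rest (s + c) c

theorem mod10_natCast (m : Nat) : PySem.Int.mod (m : Int) 10 = ((m % 10 : Nat) : Int) := by
  rw [PySem.Int.mod_eq_emod_of_pos (by norm_num)]
  omega

theorem floordiv10_natCast (m : Nat) : PySem.Int.floordiv (m : Int) 10 = ((m / 10 : Nat) : Int) := by
  rw [PySem.Int.floordiv_eq_ediv_of_pos (by norm_num)]
  exact_mod_cast (Int.natCast_div m 10).symm

theorem loopA_eq_goA (f : Nat) : ∀ (m : Nat) (s p : Int), m < f →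
    pvLoopA f (m : Int) s p = goA (lsfI m) s p := by
  induction f with
  | zero => intro m s p h; omega
  | succ f ih =>
    intro m s p h
    by_cases hm : m = 0
    · subst hm; simp [pvLoopA, lsfI, goA]
    · have hne : (m : Int) ≠ 0 := by exact_mod_cast hm
      rw [lsfI, dif_neg hm]
      show (if (m : Int) ≠ 0 then
          (if |PySem.Int.mod (m : Int) 10 - p| ≠ 2 then false
           else pvLoopA f (PySem.Int.floordiv (m : Int) 10)
                  (s + PySem.Int.mod (m : Int) 10) (PySem.Int.mod (m : Int) 10))
        else (PySem.Int.mod s 10 == 0)) = _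
      rw [if_pos hne, mod10_natCast, floordiv10_natCast]
      show _ = (if |((m % 10 : Nat) : Int) - p| ≠ 2 then false
        else goA (lsfI (m / 10)) (s + ((m % 10 : Nat) : Int)) ((m % 10 : Nat) : Int))
      by_cases hd : |((m % 10 : Nat) : Int) - p| = 2
      · rw [if_neg (not_not_intro hd), if_neg (not_not_intro hd)]
        exact ih (m / 10) _ _
          (by have := Nat.div_lt_self (Nat.pos_of_ne_zero hm) (by norm_num : 1 < 10); omega)
      · rw [if_pos hd, if_pos hd]

-- goA over the least-significant-first digit list equals adjacency-of-chain && sum-check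
theorem goA_eq_adj (rest : List Int) : ∀ (s p : Int),
    goA rest s p = (adjP (p :: rest) && (PySem.Int.mod (s + rest.sum) 10 == 0)) := by
  induction rest with
  | nil => intro s p; simp [goA, adjP]
  | cons c rest ih =>
    intro s p
    show (if |c - p| ≠ 2 then false else goA rest (s + c) c) = _
    by_cases hd : |c - p| = 2
    · rw [if_neg (by simpa using hd), ih]
      have : adjP (p :: c :: rest) = adjP (c :: rest) := by
        simp [adjP, List.zip]
        rw [abs_sub_comm] at hd
        simp [hd]
      rw [this, List.sum_cons, ← add_assoc]
    · have h1 : adjP (p :: c :: rest) = false := by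
        have : ¬ |p - c| = 2 := by rw [abs_sub_comm]; exact hd
        simp [adjP, List.zip, this]
      simp [hd, h1]

theorem adjP_nil : adjP [] = true := by simp [adjP]
theorem adjP_single (x : Int) : adjP [x] = true := by simp [adjP]
theorem adjP_cons_cons (a b : Int) (t : List Int) :
    adjP (a :: b :: t) = ((|a - b| == 2) && adjP (b :: t)) := by
  simp [adjP, List.zip]

theorem adjP_append_singleton (ys : List Int) (x : Int) :
    adjP (ys ++ [x]) = (adjP ys &&
      (match ys.getLast? with | none => true | some y => (|y - x| == 2))) := by
  induction ys with
  | nil => simp [adjP]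
  | cons y ys ih =>
    cases ys with
    | nil => simp [adjP_cons_cons, adjP_single, Bool.and_comm]
    | cons z zs =>
      simp only [List.cons_append] at ih ⊢
      rw [adjP_cons_cons, ih, adjP_cons_cons]
      simp [Bool.and_assoc, List.getLast?_cons_cons]

theorem adjP_reverse (xs : List Int) : adjP xs.reverse = adjP xs := by
  induction xs with
  | nil => rfl
  | cons x xs ih =>
    rw [List.reverse_cons, adjP_append_singleton, ih]
    cases xs with
    | nil => simp [adjP_nil, adjP_single]
    | cons y ys =>
      rw [adjP_cons_cons]
      have : (y :: ys).reverse.getLast? = some y := by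
        simp [List.getLast?_reverse]
      rw [this, abs_sub_comm, Bool.and_comm]

-- msdN is the reverse of the least-significant-first list (for m ≥ 1)
theorem msdN_eq_reverse_lsfI (m : Nat) (hm : m ≠ 0) :
    List.map (fun d : Nat => (d : Int)) (msdN m) = (lsfI m).reverse := by
  induction m using Nat.strong_induction_on with
  | _ m ih =>
    rw [msdN, lsfI]
    by_cases h : m < 10
    · have : m / 10 = 0 := Nat.div_eq_of_lt h
      simp [h, hm, lsfI, this, Nat.mod_eq_of_lt h]
    · have hq : m / 10 ≠ 0 := by
        intro h0; have := Nat.div_eq_zero_iff_lt (by norm_num : 0 < 10) |>.mp h0; omega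
      rw [if_neg h, dif_neg hm, List.reverse_cons,
        ← ih (m / 10) (Nat.div_lt_self (Nat.pos_of_ne_zero hm) (by norm_num)) hq]
      simp

-- every digit produced by msdN is < 10
theorem msdN_lt_ten (m : Nat) : ∀ d ∈ msdN m, d < 10 := by
  induction m using Nat.strong_induction_on with
  | _ m ih =>
    rw [msdN]
    by_cases h : m < 10
    · simp [h]
    · rw [if_neg h]
      intro d hd
      rcases List.mem_append.mp hd with h1 | h2
      · exact ih (m / 10) (Nat.div_lt_self (by omega) (by norm_num)) d h1
      · simp at h2; omega

theorem digitChar_val (d : Nat) (hd : d < 10) :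
    ((Nat.digitChar d).toNat : Int) - 48 = (d : Int) := by
  interval_cases d <;> decide

-- Nat.toDigits produces exactly msdN's digits as characters
theorem toDigitsCore_eq (f : Nat) : ∀ (m : Nat) (l : List Char), m < f →
    Nat.toDigitsCore 10 f m l = (msdN m).map Nat.digitChar ++ l := by
  induction f with
  | zero => intro m l h; omega
  | succ f ih =>
    intro m l h
    rw [Nat.toDigitsCore, msdN]
    by_cases h10 : m < 10
    · have : m / 10 = 0 := Nat.div_eq_of_lt h10
      simp [h10, this, Nat.mod_eq_of_lt h10]
    · have hq : m / 10 ≠ 0 := by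
        intro h0; have := Nat.div_eq_zero_iff_lt (by norm_num : 0 < 10) |>.mp h0; omega
      rw [if_neg h10]
      simp only [hq]
      rw [ih (m / 10) _ (by have := Nat.div_lt_self (by omega : 0 < m) (by norm_num : 1 < 10); omega)]
      simp

theorem toDigits_eq (m : Nat) :
    Nat.toDigits 10 m = (msdN m).map Nat.digitChar := by
  have := toDigitsCore_eq (m + 1) m [] (by omega)
  simpa [Nat.toDigits] using this

-- the digit list B builds from str(n) is exactly msdN, as Ints
theorem digitsB_eq (m : Nat) :
    (PySem.Int.toStr (m : Int)).toList.map (fun c => ((c.toNat : Int) - 48))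
      = List.map (fun d : Nat => (d : Int)) (msdN m) := by
  rw [PySem.Int.toList_toStr]
  have h1 : PySem.Int.toChars (m : Int) = Nat.toDigits 10 m := by
    simp [PySem.Int.toChars, Int.toNat_natCast,
      show ¬ ((m : Int) < 0) by exact_mod_cast Int.natCast_nonneg m |>.not_gt]
  rw [h1, toDigits_eq, List.map_map]
  refine List.map_congr_left (fun d hd => ?_)
  simpa using digitChar_val d (msdN_lt_ten m d hd)

-- all over a list is invariant under a pointwise-equal predicate
theorem allCongr {a : Type} (l : List a) (f g : a → Bool) (h : ∀ x ∈ l, f x = g x) :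
    l.all f = l.all g := by
  induction l with
  | nil => rfl
  | cons x t ih =>
    simp only [List.all_cons, h x (List.mem_cons_self), ih (fun y hy => h y (List.mem_cons_of_mem x hy))]

-- B's indexed window check equals the zip-of-adjacent-pairs check (Nat-index core)
theorem natRangeAll (g : Int → Int → Bool) : ∀ (xs : List Int),
    (List.range (xs.length - 1)).all (fun k => g (xs.getD k 0) (xs.getD (k + 1) 0))
      = pairsAll g xs := by
  intro xs
  induction xs with
  | nil => simp [pairsAll]
  | cons x t ih =>
    cases t with
    | nil => simp [pairsAll]
    | cons y s =>
      rw [show (x :: y :: s).length - 1 = ((y :: s).length - 1) + 1 by simp,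
        List.range_succ_eq_map]
      simp only [List.all_cons, List.all_map]
      rw [allCongr _ _ (fun k => g ((y :: s).getD k 0) ((y :: s).getD (k + 1) 0))
          (fun k _ => by simp [Function.comp, Nat.succ_eq_add_one]), ih]
      simp [pairsAll]

-- B's pyRange/pyGetD window check reduced to pairsAll
theorem rangeAll_eq (g : Int → Int → Bool) (xs : List Int) :
    ((PySem.List.pyRange 0 ((xs.length : Int) - 1) 1).all
      (fun i => g (PySem.List.pyGetD xs i 0) (PySem.List.pyGetD xs (i + 1) 0)))
      = pairsAll g xs := by
  rw [PySem.List.pyRange_one]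
  have hlen : (((xs.length : Int) - 1) - 0).toNat = xs.length - 1 := by omega
  rw [hlen, List.all_map]
  rw [allCongr _ _ (fun k => g (xs.getD k 0) (xs.getD (k + 1) 0)) (fun k _ => ?_)]
  · exact natRangeAll g xs
  · show g (PySem.List.pyGetD xs ((0 : Int) + (k : Int)) 0)
        (PySem.List.pyGetD xs ((0 : Int) + (k : Int) + 1) 0) = _
    have h0 : (0 : Int) + (k : Int) = (k : Int) := by ring
    have h1 : (k : Int) + 1 = ((k + 1 : Nat) : Int) := by push_cast; ring
    rw [h0, h1, PySem.List.pyGetD_natCast, PySem.List.pyGetD_natCast]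

-- table membership coincides with |a-b| = 2 on decimal digits
theorem table_eq_abs (a b : Int) (ha0 : 0 ≤ a) (ha : a < 10) (hb0 : 0 ≤ b) (hb : b < 10) :
    pvValidSteps.contains (a, b) = (|a - b| == 2) := by
  interval_cases a <;> interval_cases b <;> decide

theorem pairsAll_table_eq_adjP (xs : List Int)
    (h : ∀ x ∈ xs, 0 ≤ x ∧ x < 10) :
    pairsAll (fun a b => pvValidSteps.contains (a, b)) xs = adjP xs := by
  unfold pairsAll adjP
  refine allCongr _ _ _ (fun ab hab => ?_)
  have h1 := List.of_mem_zip hab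
  have hx := h ab.1 h1.1
  have hy := h ab.2 (List.mem_of_mem_tail h1.2)
  exact table_eq_abs ab.1 ab.2 hx.1 hx.2 hy.1 hy.2

theorem check_alt_eq (m : Nat) :
    Check_alt (m : Int) = (adjP (List.map (fun d : Nat => (d : Int)) (msdN m))
      && (PySem.Int.mod ((List.map (fun d : Nat => (d : Int)) (msdN m)).sum) 10 == 0)) := by
  unfold Check_alt
  simp only [digitsB_eq]
  rw [rangeAll_eq (fun a b => pvValidSteps.contains (a, b)), pairsAll_table_eq_adjP]
  intro x hx
  rcases List.mem_map.mp hx with ⟨d, hd, rfl⟩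
  exact ⟨Int.natCast_nonneg d, by exact_mod_cast msdN_lt_ten m d hd⟩

-- ===== VERDICT (by name: the statement is the Claim_ definition above) =====
theorem Check_spec : Claim_equal_Check := by
  intro n _ hpre
  unfold Spec_Check
  obtain ⟨m, rfl⟩ := Int.eq_ofNat_of_zero_le hpre
  unfold Check
  simp only [mod10_natCast, floordiv10_natCast, Int.natAbs_natCast]
  rw [loopA_eq_goA (m + 1) (m / 10) _ _ (by omega), goA_eq_adj, check_alt_eq]
  by_cases hm : m = 0
  · subst hm
    rw [show msdN 0 = [0] from by rw [msdN]; rfl, show lsfI 0 = [] from by rw [lsfI]; rfl]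
    simp [adjP]
  · rw [msdN_eq_reverse_lsfI m hm, adjP_reverse]
    simp only [List.sum_reverse]
    conv_rhs => rw [lsfI, dif_neg hm]
    rw [List.sum_cons]
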